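-- pv_equiv track=rewrite | github.com/mz1991/Bayes-VS-SVM | BClassifier/BClassifier.py | GetTypeError
-- ===== SOURCE A (Python) =====
-- def GetTypeError(testSet,predictionDict):
-- 	# per valida si intende: e un sito di phishing (cioe rispondo alla domanda: "il sito e di phishing")
-- 	# sito phishing = 1
-- 	# sito non phishing = -1
-- 	falsiPositivi =0	# ipotesi valida, rifiutata
-- 	falsiNegativi =0	# ipotesi sbagliata accettata
-- 	veriPositivi  =0	# ipotesi valida accettata
-- 	veriNegativi  =0	# ipotesi sbagliata rifiutata
-- 	for index,line in enumerate(testSet):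
-- 		if (str(line[-1])=="1") and (str(predictionDict[index])=="1"):
-- 			veriNegativi+=1
-- 		if (str(line[-1])=="-1") and (str(predictionDict[index])=="-1"):
-- 			veriPositivi+=1
-- 		if (str(line[-1])=="1") and (str(predictionDict[index])=="-1"):
-- 			falsiPositivi+=1
-- 		if (str(line[-1])=="-1") and (str(predictionDict[index])=="1"):
-- 			falsiNegativi+=1
-- 	return falsiPositivi,falsiNegativi,veriPositivi,veriNegativi
-- ===== SOURCE B (Python) =====
-- def GetTypeError(testSet, predictionDict):
--     # Stage 1: project each labelled row to its (actual, predicted) string pair;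
--     # rows whose label is not "1"/"-1" never touch predictionDict (A short-circuits there too).
--     pairs = [(str(line[-1]), str(predictionDict[index]))
--              for index, line in enumerate(testSet)
--              if str(line[-1]) in ("1", "-1")]
--     # Stage 2: read each confusion cell off with a separate count scan.
--     return (pairs.count(("1", "-1")), pairs.count(("-1", "1")),
--             pairs.count(("-1", "-1")), pairs.count(("1", "1")))
-- ===== Notes on version B (the rewrite author's own statement) =====
-- stated objective: simpler
-- what changed: Replaces A's single pass with four in-loop branch counters by a staged pipeline: one comprehension projecting each labelled row to its (actual,predicted) string pair, then four separate list.count scans reading the confusion cells off the pair list.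
import Mathlib
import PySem

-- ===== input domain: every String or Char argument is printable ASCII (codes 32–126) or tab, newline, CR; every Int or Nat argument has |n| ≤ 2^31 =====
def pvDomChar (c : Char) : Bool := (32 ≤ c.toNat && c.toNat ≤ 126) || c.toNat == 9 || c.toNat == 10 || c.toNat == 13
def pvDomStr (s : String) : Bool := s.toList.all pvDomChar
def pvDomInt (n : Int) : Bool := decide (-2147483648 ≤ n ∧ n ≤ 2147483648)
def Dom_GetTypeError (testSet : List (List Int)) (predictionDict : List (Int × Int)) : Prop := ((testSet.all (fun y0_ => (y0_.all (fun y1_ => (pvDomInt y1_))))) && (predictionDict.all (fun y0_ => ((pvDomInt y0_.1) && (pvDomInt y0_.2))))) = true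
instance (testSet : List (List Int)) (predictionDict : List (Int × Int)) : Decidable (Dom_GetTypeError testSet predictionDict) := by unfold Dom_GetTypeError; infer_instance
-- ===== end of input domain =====

-- B replaces A's single loop with four in-loop branch counters by a staged pipeline:
-- project each labelled row to its (actual, predicted) string pair, then four count scans (simpler).

-- ===== PORT A =====
-- loop body of A: the four independent if-branches, in source order
def aStep (d : PySem.Dict Int Int) (s : Int × Int × Int × Int) (p : Int × List Int) :
    Int × Int × Int × Int :=
  let last := PySem.Int.toStr (PySem.List.pyGetD p.2 (-1) 0)      -- str(line[-1]); Pre_ rules out the empty-line IndexError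
  let pred := PySem.Int.toStr (d.getD p.1 0)                      -- str(predictionDict[index]); Pre_ rules out the KeyError
  let s1 := if last = "1" ∧ pred = "1" then (s.1, s.2.1, s.2.2.1, s.2.2.2 + 1) else s
  let s2 := if last = "-1" ∧ pred = "-1" then (s1.1, s1.2.1, s1.2.2.1 + 1, s1.2.2.2) else s1
  let s3 := if last = "1" ∧ pred = "-1" then (s2.1 + 1, s2.2.1, s2.2.2.1, s2.2.2.2) else s2
  if last = "-1" ∧ pred = "1" then (s3.1, s3.2.1 + 1, s3.2.2.1, s3.2.2.2) else s3

def GetTypeError (testSet : List (List Int)) (predictionDict : List (Int × Int)) :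
    Int × Int × Int × Int :=
  (PySem.List.enumerate testSet).foldl (aStep (PySem.Dict.mk predictionDict)) (0, 0, 0, 0)

-- ===== PORT B =====
-- Stage 1 of Source B: the comprehension = filter by the label test, then map to the string pair
-- (the prediction is read only for rows that pass the filter, matching A's short-circuit);
-- Stage 2: four separate List.count scans.
def GetTypeError_alt (testSet : List (List Int)) (predictionDict : List (Int × Int)) :
    Int × Int × Int × Int :=
  let d := PySem.Dict.mk predictionDict
  let pairs := ((PySem.List.enumerate testSet).filter
      (fun p => decide (PySem.Int.toStr (PySem.List.pyGetD p.2 (-1) 0) = "1"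
                      ∨ PySem.Int.toStr (PySem.List.pyGetD p.2 (-1) 0) = "-1"))).map
      (fun p => (PySem.Int.toStr (PySem.List.pyGetD p.2 (-1) 0), PySem.Int.toStr (d.getD p.1 0)))
  ((pairs.count ("1", "-1") : Int), (pairs.count ("-1", "1") : Int),
   (pairs.count ("-1", "-1") : Int), (pairs.count ("1", "1") : Int))

-- ===== PRECONDITION & SPEC =====
-- Pre_ excludes exactly the inputs on which the Python A raises: an empty row (IndexError on
-- line[-1]) or a row labelled 1/-1 whose enumeration index is missing from predictionDict
-- (KeyError; for other labels `and` short-circuits and the dict is never read).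
def Pre_GetTypeError (testSet : List (List Int)) (predictionDict : List (Int × Int)) : Prop :=
  (∀ line ∈ testSet, line ≠ []) ∧
  (∀ i ∈ List.range testSet.length,
    (PySem.List.pyGetD testSet[i]! (-1) 0 = 1 ∨ PySem.List.pyGetD testSet[i]! (-1) 0 = -1) →
    ((PySem.Dict.mk predictionDict).get? (i : Int)).isSome = true)
instance (testSet : List (List Int)) (predictionDict : List (Int × Int)) : Decidable (Pre_GetTypeError testSet predictionDict) := by unfold Pre_GetTypeError; infer_instance

def pvWitness_GetTypeError : List (List Int) × (List (Int × Int)) :=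
  ([[5, 1], [3, -1], [2, 1]], [(0, 1), (1, -1), (2, -1)])

def Spec_GetTypeError (testSet : List (List Int)) (predictionDict : List (Int × Int)) (out : Int × Int × Int × Int) : Prop := out = GetTypeError_alt testSet predictionDict
instance (testSet : List (List Int)) (predictionDict : List (Int × Int)) (out : Int × Int × Int × Int) : Decidable (Spec_GetTypeError testSet predictionDict out) := by unfold Spec_GetTypeError; infer_instance

-- ===== CLAIM (what is proved, stated in full; the proofs are below) =====
def Claim_equal_GetTypeError : Prop := ∀ (testSet : List (List Int)) (predictionDict : List (Int × Int)), Dom_GetTypeError testSet predictionDict → Pre_GetTypeError testSet predictionDict → Spec_GetTypeError testSet predictionDict (GetTypeError testSet predictionDict)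

-- ===== LEMMAS AND PROOFS =====
-- the key pair A's four branches are really driven by
def keyOf (d : PySem.Dict Int Int) (p : Int × List Int) : String × String :=
  (PySem.Int.toStr (PySem.List.pyGetD p.2 (-1) 0), PySem.Int.toStr (d.getD p.1 0))

lemma aStep_eq (d : PySem.Dict Int Int) (s : Int × Int × Int × Int) (p : Int × List Int) :
    aStep d s p =
      (s.1 + (if keyOf d p = ("1", "-1") then 1 else 0),
       s.2.1 + (if keyOf d p = ("-1", "1") then 1 else 0),
       s.2.2.1 + (if keyOf d p = ("-1", "-1") then 1 else 0),
       s.2.2.2 + (if keyOf d p = ("1", "1") then 1 else 0)) := by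
  obtain ⟨w, x, y, z⟩ := s
  unfold aStep keyOf
  generalize PySem.Int.toStr (PySem.List.pyGetD p.2 (-1) 0) = a
  generalize PySem.Int.toStr (d.getD p.1 0) = b
  split_ifs <;> simp_all [Prod.ext_iff] <;> split_ifs <;> simp_all

lemma foldl_aStep (d : PySem.Dict Int Int) (l : List (Int × List Int)) (s : Int × Int × Int × Int) :
    l.foldl (aStep d) s =
      (s.1 + ((l.map (keyOf d)).count ("1", "-1") : Int),
       s.2.1 + ((l.map (keyOf d)).count ("-1", "1") : Int),
       s.2.2.1 + ((l.map (keyOf d)).count ("-1", "-1") : Int),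
       s.2.2.2 + ((l.map (keyOf d)).count ("1", "1") : Int)) := by
  induction l generalizing s with
  | nil => simp
  | cons p t ih =>
    simp only [List.foldl_cons, ih, aStep_eq, List.map_cons, List.count_cons]
    refine Prod.ext ?_ (Prod.ext ?_ (Prod.ext ?_ ?_)) <;> simp <;> split_ifs <;> simp_all <;> omega

-- counting a key whose first component is "1"/"-1" is unchanged by B's label filter
lemma count_filter_map (d : PySem.Dict Int Int) (l : List (Int × List Int)) (k : String × String)
    (hk : k.1 = "1" ∨ k.1 = "-1") :
    (((l.filter (fun p => decide (PySem.Int.toStr (PySem.List.pyGetD p.2 (-1) 0) = "1"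
                                ∨ PySem.Int.toStr (PySem.List.pyGetD p.2 (-1) 0) = "-1"))).map
        (keyOf d)).count k)
      = ((l.map (keyOf d)).count k) := by
  rw [show (fun p : Int × List Int => decide (PySem.Int.toStr (PySem.List.pyGetD p.2 (-1) 0) = "1"
                                ∨ PySem.Int.toStr (PySem.List.pyGetD p.2 (-1) 0) = "-1"))
        = ((fun q : String × String => decide (q.1 = "1" ∨ q.1 = "-1")) ∘ keyOf d) from rfl,
      ← List.filter_map, List.count_filter (by simpa using hk)]

-- ===== VERDICT (by name: the statement is the Claim_ definition above) =====
theorem GetTypeError_spec : Claim_equal_GetTypeError := by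
  intro testSet predictionDict _ _
  show GetTypeError testSet predictionDict = GetTypeError_alt testSet predictionDict
  simp only [GetTypeError, GetTypeError_alt]
  rw [foldl_aStep]
  rw [show (fun p : Int × List Int => (PySem.Int.toStr (PySem.List.pyGetD p.2 (-1) 0),
        PySem.Int.toStr ((PySem.Dict.mk predictionDict).getD p.1 0)))
      = keyOf (PySem.Dict.mk predictionDict) from rfl]
  rw [count_filter_map _ _ _ (Or.inl rfl), count_filter_map _ _ _ (Or.inr rfl),
      count_filter_map _ _ _ (Or.inr rfl), count_filter_map _ _ _ (Or.inl rfl)]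
  norm_num
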